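-- pv_equiv track=rewrite | github.com/jzz0026/Data_Science_Immersive_Galvanize | week0/Assignments_1.py | split_vowel_consonant_punctuation
-- ===== SOURCE A (Python) =====
-- import string
--
-- def split_vowel_consonant_punctuation(stri):
--     '''Split a string into three strings: one containing vowels, one containing
--     consonants, and one containing punctuation.
--
--     $ s = "My cat's name is Moshi!  She is old, but friendly."
--     $ split_vowel_consonant_punctuation(s)
--     ["aaeioieiouie", "MyctsnmsMshShsldbtfrndly", " '   !    ,  ."]
--
--     Hint: Look up the `.join` method on strings!
--
--     Parameters
--     ----------
--     string: str
--
--     Returns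
--     -------
--     vowel_consonant_punctuation: list of three strings.
--       The first element in the list contains only vowels, the second only
--       consonants, and the third only punctuation.
--     '''
--     all_letter = set(string.ascii_lowercase + string.ascii_lowercase.upper())
--     vowels = {"a","e","i","o","u","A","E","I","O","U","S","s"}
--     consonants = all_letter - vowels
--     stri_vowels = []
--     stri_consonants = []
--     others = []
--     for letter in stri:
--         if letter in vowels:
--             stri_vowels.append(letter)
--         elif letter in consonants:
--             stri_consonants.append(letter)
--         else:
--             others.append(letter)
--     return ["".join(stri_vowels),"".join(stri_consonants),"".join(others)]
-- ===== SOURCE B (Python) =====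
-- import string
--
-- def split_vowel_consonant_punctuation(stri):
--     vowels = "aeiouAEIOUSs"
--     letters = string.ascii_letters
--     return ["".join(c for c in stri if c in vowels),
--             "".join(c for c in stri if c in letters and c not in vowels),
--             "".join(c for c in stri if c not in letters)]
-- ===== Notes on version B (the rewrite author's own statement) =====
-- stated objective: simpler
-- what changed: Replaces the single categorizing loop with three accumulator lists and a set difference by three independent filtering comprehensions, one per output string.
import Mathlib
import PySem

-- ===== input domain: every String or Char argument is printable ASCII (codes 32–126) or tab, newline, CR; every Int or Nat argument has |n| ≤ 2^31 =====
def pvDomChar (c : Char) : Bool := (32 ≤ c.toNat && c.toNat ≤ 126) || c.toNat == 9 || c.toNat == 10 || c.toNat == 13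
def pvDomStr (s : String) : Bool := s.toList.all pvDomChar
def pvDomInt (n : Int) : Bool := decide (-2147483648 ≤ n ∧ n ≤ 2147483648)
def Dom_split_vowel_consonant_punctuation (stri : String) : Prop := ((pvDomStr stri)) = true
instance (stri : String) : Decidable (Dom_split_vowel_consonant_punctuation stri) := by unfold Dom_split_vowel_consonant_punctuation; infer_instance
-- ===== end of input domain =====

-- B replaces A's single three-way categorizing loop (with a set difference for the
-- consonant set) by three independent filtering passes, one per output string; simpler.

-- ===== PORT A =====
-- string.ascii_lowercase + its .upper(), as a set (all distinct)
def pvAllLetterA : List Char :=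
  "abcdefghijklmnopqrstuvwxyzABCDEFGHIJKLMNOPQRSTUVWXYZ".toList

def pvVowelsA : List Char := ['a','e','i','o','u','A','E','I','O','U','S','s']

-- consonants = all_letter - vowels (set difference)
def pvConsonantsA : List Char := pvAllLetterA.filter (fun c => !(pvVowelsA.contains c))

def split_vowel_consonant_punctuation (stri : String) : List String :=
  let st := stri.toList.foldl
    (fun (acc : List Char × List Char × List Char) letter =>
      if pvVowelsA.contains letter then (acc.1 ++ [letter], acc.2.1, acc.2.2)
      else if pvConsonantsA.contains letter then (acc.1, acc.2.1 ++ [letter], acc.2.2)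
      else (acc.1, acc.2.1, acc.2.2 ++ [letter]))
    ([], [], [])
  [String.ofList st.1, String.ofList st.2.1, String.ofList st.2.2]

-- ===== PORT B =====
def pvVowelsB : List Char := "aeiouAEIOUSs".toList
def pvLettersB : List Char :=
  "abcdefghijklmnopqrstuvwxyzABCDEFGHIJKLMNOPQRSTUVWXYZ".toList

def split_vowel_consonant_punctuation_alt (stri : String) : List String :=
  [String.ofList (stri.toList.filter (fun c => pvVowelsB.contains c)),
   String.ofList (stri.toList.filter (fun c => pvLettersB.contains c && !(pvVowelsB.contains c))),
   String.ofList (stri.toList.filter (fun c => !(pvLettersB.contains c)))]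

-- ===== PRECONDITION & SPEC =====
def Spec_split_vowel_consonant_punctuation (stri : String) (out : List String) : Prop := out = split_vowel_consonant_punctuation_alt stri
instance (stri : String) (out : List String) : Decidable (Spec_split_vowel_consonant_punctuation stri out) := by unfold Spec_split_vowel_consonant_punctuation; infer_instance

-- ===== CLAIM (what is proved, stated in full; the proofs are below) =====
def Claim_equal_split_vowel_consonant_punctuation : Prop := ∀ (stri : String), Dom_split_vowel_consonant_punctuation stri → Spec_split_vowel_consonant_punctuation stri (split_vowel_consonant_punctuation stri)

-- ===== LEMMAS AND PROOFS =====

theorem vowels_same : pvVowelsA = pvVowelsB := by decide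

-- A's membership test in the set difference equals B's conjunction, per character.
theorem mem_consA_iff (a : Char) : a ∈ pvConsonantsA ↔ a ∈ pvLettersB ∧ a ∉ pvVowelsB := by
  simp [pvConsonantsA, pvAllLetterA, pvLettersB, List.mem_filter, ← vowels_same]

-- every vowel of A's set is a letter
theorem vowel_letter (a : Char) (h : a ∈ pvVowelsA) : a ∈ pvLettersB := by
  fin_cases h <;> decide

-- the loop invariant: A's fold appends exactly B's three filters
theorem fold_eq (l : List Char) (v c o : List Char) :
    l.foldl
      (fun (acc : List Char × List Char × List Char) letter =>
        if pvVowelsA.contains letter then (acc.1 ++ [letter], acc.2.1, acc.2.2)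
        else if pvConsonantsA.contains letter then (acc.1, acc.2.1 ++ [letter], acc.2.2)
        else (acc.1, acc.2.1, acc.2.2 ++ [letter]))
      (v, c, o)
    = (v ++ l.filter (fun x => pvVowelsB.contains x),
       c ++ l.filter (fun x => pvLettersB.contains x && !(pvVowelsB.contains x)),
       o ++ l.filter (fun x => !(pvLettersB.contains x))) := by
  induction l generalizing v c o with
  | nil => simp
  | cons a l ih =>
    simp only [List.foldl_cons, List.filter_cons, List.contains_eq_mem] at ih ⊢
    by_cases hv : a ∈ pvVowelsA
    · have hvb : a ∈ pvVowelsB := vowels_same ▸ hv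
      have hl : a ∈ pvLettersB := vowel_letter a hv
      rw [if_pos (decide_eq_true hv), ih]
      simp [hvb, hl]
    · have hvb : a ∉ pvVowelsB := by rw [← vowels_same]; exact hv
      by_cases hc : a ∈ pvConsonantsA
      · have hl : a ∈ pvLettersB := ((mem_consA_iff a).mp hc).1
        rw [if_neg (by simpa using hv), if_pos (decide_eq_true hc), ih]
        simp [hvb, hl]
      · have hl : a ∉ pvLettersB := fun h => hc ((mem_consA_iff a).mpr ⟨h, hvb⟩)
        rw [if_neg (by simpa using hv), if_neg (by simpa using hc), ih]
        simp [hvb, hl]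

-- ===== VERDICT (by name: the statement is the Claim_ definition above) =====
theorem split_vowel_consonant_punctuation_spec : Claim_equal_split_vowel_consonant_punctuation := by
  intro stri _
  unfold Spec_split_vowel_consonant_punctuation split_vowel_consonant_punctuation
    split_vowel_consonant_punctuation_alt
  simp only [fold_eq, List.nil_append]
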